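-- pv_equiv track=rewrite | github.com/JeanCarlos931/VirusesVSHumans | guardador.py | convertir_numero_a_fila
-- ===== SOURCE A (Python) =====
-- def convertir_numero_a_fila(numero, tamaño_matriz):
--     """
--     Reconstruye una fila a partir del número en base 3
--     Ejemplo: 5 → [0,1,2] (5 = 0*3² + 1*3¹ + 2*3⁰)
--     """
--     fila = []
--     for posicion in range(tamaño_matriz):  # Para cada celda en la fila
--         # Calcular la potencia actual (de mayor a menor)
--         potencia = tamaño_matriz - posicion - 1
--         divisor = 3 ** potencia
--         # Obtener el dígito correspondiente
--         valor = numero // divisor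
--         fila.append(valor)
--         # Actualizar el número con el resto
--         numero %= divisor  # Ej: 5 % 3² = 5 % 9 = 5 → siguiente iteración 5/3¹ = 1
--     return fila
-- ===== SOURCE B (Python) =====
-- def convertir_numero_a_fila(numero, tamaño_matriz):
--     """Base-3 digits, fixed width, built from the least-significant end with
--     divmod by 3 and reversed: O(n) small divisions instead of recomputing
--     3**potencia at every position."""
--     if tamaño_matriz <= 0:
--         return []
--     fila = []
--     for _ in range(tamaño_matriz - 1):
--         numero, digito = divmod(numero, 3)
--         fila.append(digito)
--     fila.append(numero)  # leading cell takes the remaining quotient, as in the MSB-first scheme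
--     fila.reverse()
--     return fila
-- ===== Notes on version B (the rewrite author's own statement) =====
-- stated objective: faster
-- what changed: Replaces the MSB-first loop that recomputes 3**potencia and takes floordiv/mod by a huge divisor at every position with a single LSB-first divmod-by-3 loop (the leading cell keeps the final quotient) followed by a reverse.
import Mathlib
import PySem

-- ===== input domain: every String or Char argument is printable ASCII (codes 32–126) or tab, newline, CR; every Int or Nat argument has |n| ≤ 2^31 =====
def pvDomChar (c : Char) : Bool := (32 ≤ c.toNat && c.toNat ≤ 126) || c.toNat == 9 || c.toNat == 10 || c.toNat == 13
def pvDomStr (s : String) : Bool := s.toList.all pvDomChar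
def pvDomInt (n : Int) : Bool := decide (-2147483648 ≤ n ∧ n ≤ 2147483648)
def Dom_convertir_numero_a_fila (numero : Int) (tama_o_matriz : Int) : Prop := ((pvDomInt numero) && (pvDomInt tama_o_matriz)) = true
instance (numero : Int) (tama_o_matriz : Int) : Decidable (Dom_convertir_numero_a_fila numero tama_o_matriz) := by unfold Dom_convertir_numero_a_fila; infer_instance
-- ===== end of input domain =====

-- B replaces A's per-position 3**potencia / floordiv / mod chain by a single LSB-first divmod-by-3
-- loop plus a reverse (objective: faster, O(n) small divisions instead of O(n^2)-size power computations).

-- ===== PORT A =====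
-- 3 ** potencia: potencia = tama_o_matriz - posicion - 1 ≥ 0 for every posicion in range, so
-- (… ).toNat as exponent is exact here.
def convertir_numero_a_fila (numero : Int) (tama_o_matriz : Int) : List Int :=
  ((PySem.List.pyRange 0 tama_o_matriz 1).foldl
    (fun (s : List Int × Int) pos =>
      let divisor := (3 : Int) ^ (tama_o_matriz - pos - 1).toNat
      (s.1 ++ [PySem.Int.floordiv s.2 divisor], PySem.Int.mod s.2 divisor))
    ([], numero)).1

-- ===== PORT B =====
def convertir_numero_a_fila_alt (numero : Int) (tama_o_matriz : Int) : List Int :=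
  if tama_o_matriz ≤ 0 then []
  else
    let s := (PySem.List.pyRange 0 (tama_o_matriz - 1) 1).foldl
      (fun (s : Int × List Int) _ =>
        (PySem.Int.floordiv s.1 3, s.2 ++ [PySem.Int.mod s.1 3]))
      (numero, [])
    (s.2 ++ [s.1]).reverse

-- ===== PRECONDITION & SPEC =====
def Spec_convertir_numero_a_fila (numero : Int) (tama_o_matriz : Int) (out : List Int) : Prop := out = convertir_numero_a_fila_alt numero tama_o_matriz
instance (numero : Int) (tama_o_matriz : Int) (out : List Int) : Decidable (Spec_convertir_numero_a_fila numero tama_o_matriz out) := by unfold Spec_convertir_numero_a_fila; infer_instance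

-- ===== CLAIM (what is proved, stated in full; the proofs are below) =====
def Claim_equal_convertir_numero_a_fila : Prop := ∀ (numero : Int) (tama_o_matriz : Int), Dom_convertir_numero_a_fila numero tama_o_matriz → Spec_convertir_numero_a_fila numero tama_o_matriz (convertir_numero_a_fila numero tama_o_matriz)

-- ===== LEMMAS AND PROOFS =====

-- Reference MSB-first digit list (what A's loop computes, with the loop state made explicit).
def aLoop : Nat → Int → List Int
  | 0, _ => []
  | n+1, x => PySem.Int.floordiv x ((3 : Int) ^ n) :: aLoop n (PySem.Int.mod x ((3 : Int) ^ n))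

-- LSB-first digits and remaining quotient (what B's loop computes).
def bLoop : Nat → Int → List Int
  | 0, _ => []
  | n+1, x => PySem.Int.mod x 3 :: bLoop n (PySem.Int.floordiv x 3)

def bQuot : Nat → Int → Int
  | 0, x => x
  | n+1, x => bQuot n (PySem.Int.floordiv x 3)

lemma pow3_pos (n : Nat) : (0 : Int) < 3 ^ n := by positivity

lemma fdiv_fdiv (x : Int) (n : Nat) :
    PySem.Int.floordiv (PySem.Int.floordiv x 3) ((3 : Int) ^ n) = PySem.Int.floordiv x ((3 : Int) ^ (n+1)) := by
  rw [PySem.Int.floordiv_eq_ediv_of_pos (by norm_num : (0:Int) < 3),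
      PySem.Int.floordiv_eq_ediv_of_pos (pow3_pos n),
      PySem.Int.floordiv_eq_ediv_of_pos (pow3_pos (n+1))]
  rw [Int.ediv_ediv_of_nonneg (by norm_num)]
  ring_nf

lemma mod_mod (x : Int) (n : Nat) :
    PySem.Int.mod (PySem.Int.mod x ((3 : Int) ^ (n+1))) 3 = PySem.Int.mod x 3 := by
  rw [PySem.Int.mod_eq_emod_of_pos (pow3_pos (n+1)),
      PySem.Int.mod_eq_emod_of_pos (by norm_num : (0:Int) < 3),
      PySem.Int.mod_eq_emod_of_pos (by norm_num : (0:Int) < 3)]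
  exact Int.emod_emod_of_dvd x ⟨3 ^ n, by ring⟩

lemma mod_fdiv (x : Int) (n : Nat) :
    PySem.Int.floordiv (PySem.Int.mod x ((3 : Int) ^ (n+1))) 3 = PySem.Int.mod (PySem.Int.floordiv x 3) ((3 : Int) ^ n) := by
  rw [PySem.Int.mod_eq_emod_of_pos (pow3_pos (n+1)),
      PySem.Int.mod_eq_emod_of_pos (pow3_pos n),
      PySem.Int.floordiv_eq_ediv_of_pos (by norm_num : (0:Int) < 3),
      PySem.Int.floordiv_eq_ediv_of_pos (by norm_num : (0:Int) < 3)]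
  have hr0 : (0:Int) ≤ x % 3 := Int.emod_nonneg x (by norm_num)
  have hr3 : x % 3 < 3 := Int.emod_lt_of_pos x (by norm_num)
  have hR0 : (0:Int) ≤ (x/3) % 3^n := Int.emod_nonneg _ (by positivity)
  have hRlt : (x/3) % 3^n < 3^n := Int.emod_lt_of_pos _ (pow3_pos n)
  have hx : 3 * (x/3) + x % 3 = x := Int.mul_ediv_add_emod x 3
  have hq : 3^n * ((x/3)/3^n) + (x/3) % 3^n = x/3 := Int.mul_ediv_add_emod (x/3) ((3:Int)^n)
  have hsplit : x = (3 * ((x/3) % 3^n) + x % 3) + 3^(n+1) * ((x/3)/3^n) := by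
    have hp : (3:Int)^(n+1) = 3 * 3^n := by ring
    rw [hp]; nlinarith [hx, hq]
  have hlt : 3 * ((x/3) % 3^n) + x % 3 < 3^(n+1) := by
    have hp : (3:Int)^(n+1) = 3 * 3^n := by ring
    rw [hp]; nlinarith
  have hmod : x % 3^(n+1) = 3 * ((x/3) % 3^n) + x % 3 := by
    conv_lhs => rw [hsplit]
    rw [Int.add_mul_emod_self_left]
    exact Int.emod_eq_of_lt (by omega) hlt
  rw [hmod]
  omega

-- Peeling A's last (least-significant) digit.
lemma aLoop_snoc : ∀ (n : Nat) (x : Int),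
    aLoop (n+2) x = aLoop (n+1) (PySem.Int.floordiv x 3) ++ [PySem.Int.mod x 3] := by
  intro n
  induction n with
  | zero =>
    intro x
    simp [aLoop]
  | succ n ih =>
    intro x
    show aLoop (n+3) x = aLoop (n+2) (PySem.Int.floordiv x 3) ++ [PySem.Int.mod x 3]
    have lhs : aLoop (n+3) x
        = PySem.Int.floordiv x ((3:Int) ^ (n+2)) :: aLoop (n+2) (PySem.Int.mod x ((3:Int) ^ (n+2))) := rfl
    have rhs : aLoop (n+2) (PySem.Int.floordiv x 3)
        = PySem.Int.floordiv (PySem.Int.floordiv x 3) ((3:Int) ^ (n+1))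
          :: aLoop (n+1) (PySem.Int.mod (PySem.Int.floordiv x 3) ((3:Int) ^ (n+1))) := rfl
    rw [lhs, rhs, ih (PySem.Int.mod x ((3:Int) ^ (n+2)))]
    rw [fdiv_fdiv x (n+1), mod_mod x (n+1), mod_fdiv x (n+1)]
    simp

-- A's MSB-first digits are B's reversed LSB digits with the remaining quotient in front.
lemma aLoop_eq_b : ∀ (n : Nat) (x : Int),
    aLoop (n+1) x = bQuot n x :: (bLoop n x).reverse := by
  intro n
  induction n with
  | zero => intro x; simp [aLoop, bQuot, bLoop]
  | succ n ih =>
    intro x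
    rw [aLoop_snoc n x, ih (PySem.Int.floordiv x 3)]
    simp [bQuot, bLoop]

-- A's foldl over the tail of the range, with k iterations remaining.
lemma foldA (tama : Int) : ∀ (k : Nat) (x : Int) (acc : List Int),
    ((PySem.List.pyRange (tama - k) tama 1).foldl
      (fun (s : List Int × Int) pos =>
        (s.1 ++ [PySem.Int.floordiv s.2 ((3 : Int) ^ (tama - pos - 1).toNat)],
         PySem.Int.mod s.2 ((3 : Int) ^ (tama - pos - 1).toNat)))
      (acc, x)).1 = acc ++ aLoop k x := by
  intro k
  induction k with
  | zero =>
    intro x acc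
    rw [PySem.List.pyRange_one_eq_nil (by simp)]
    simp [aLoop]
  | succ k ih =>
    intro x acc
    rw [PySem.List.pyRange_one_cons (by push_cast; omega)]
    rw [List.foldl_cons]
    have hpos : tama - (tama - ((k:Int)+1)) - 1 = (k : Int) := by ring
    have harg : tama - ((k+1 : Nat) : Int) + 1 = tama - (k : Int) := by push_cast; omega
    have hexp : (tama - (tama - ((k+1 : Nat) : Int)) - 1).toNat = k := by push_cast; omega
    rw [harg, hexp]
    rw [ih (PySem.Int.mod x ((3:Int) ^ k)) (acc ++ [PySem.Int.floordiv x ((3:Int) ^ k)])]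
    simp [aLoop]

-- B's foldl: k iterations of divmod by 3.
lemma foldB : ∀ (k : Nat) (a x : Int) (acc : List Int),
    (PySem.List.pyRange a (a + k) 1).foldl
      (fun (s : Int × List Int) _ =>
        (PySem.Int.floordiv s.1 3, s.2 ++ [PySem.Int.mod s.1 3]))
      (x, acc) = (bQuot k x, acc ++ (bLoop k x).reverse.reverse) := by
  intro k
  induction k with
  | zero =>
    intro a x acc
    rw [PySem.List.pyRange_one_eq_nil (by simp)]
    simp [bQuot, bLoop]
  | succ k ih =>
    intro a x acc
    rw [PySem.List.pyRange_one_cons (by push_cast; omega)]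
    rw [List.foldl_cons]
    have : a + ((k+1:Nat) : Int) = (a + 1) + (k : Int) := by push_cast; omega
    rw [this, ih (a+1) (PySem.Int.floordiv x 3) (acc ++ [PySem.Int.mod x 3])]
    simp [bQuot, bLoop]

-- ===== VERDICT (by name: the statement is the Claim_ definition above) =====
theorem convertir_numero_a_fila_spec : Claim_equal_convertir_numero_a_fila := by
  intro numero tama _dom
  unfold Spec_convertir_numero_a_fila convertir_numero_a_fila convertir_numero_a_fila_alt
  by_cases h : tama ≤ 0
  · rw [if_pos h, PySem.List.pyRange_one_eq_nil h]
    simp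
  · rw [if_neg h]
    push Not at h
    obtain ⟨n, hn⟩ : ∃ n : Nat, tama = (n : Int) + 1 :=
      ⟨(tama - 1).toNat, by omega⟩
    have hA : tama - ((n+1 : Nat) : Int) = 0 := by push_cast; omega
    have := foldA tama (n+1) numero []
    rw [hA] at this
    rw [this]
    have hB : tama - 1 = 0 + (n : Int) := by omega
    rw [hB, foldB n 0 numero []]
    simp [aLoop_eq_b n numero]
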